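-- pv_equiv track=rewrite | github.com/selameddin00/LexiLocal | analysis/rag_report.py | _filter_chunks_by_labels
-- ===== SOURCE A (Python) =====
-- from typing import List, Dict, Any
--
-- PRIORITY_ORDER = ["method", "benefit", "application", "effect", "definition"]
--
-- MAX_CHUNKS_PER_LABEL = 5
--
-- def _filter_chunks_by_labels(
--     all_chunks: List[Dict[str, Any]],
--     labels: List[str],
-- ) -> Dict[str, List[Dict[str, Any]]]:
--     grouped: Dict[str, List[Dict[str, Any]]] = {label: [] for label in labels}
--
--     for label in labels:
--         label_chunks = [
--             chunk for chunk in all_chunks if str(chunk.get("label", "")).strip() == label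
--         ]
--         sorted_chunks = sorted(
--             label_chunks,
--             key=lambda item: PRIORITY_ORDER.index(item.get("type"))
--             if item.get("type") in PRIORITY_ORDER
--             else len(PRIORITY_ORDER),
--         )
--         grouped[label] = sorted_chunks[:MAX_CHUNKS_PER_LABEL]
--
--     return grouped
-- ===== SOURCE B (Python) =====
-- from typing import List, Dict, Any
--
-- PRIORITY_ORDER = ["method", "benefit", "application", "effect", "definition"]
--
-- MAX_CHUNKS_PER_LABEL = 5
--
-- def _filter_chunks_by_labels(
--     all_chunks: List[Dict[str, Any]],
--     labels: List[str],
-- ) -> Dict[str, List[Dict[str, Any]]]: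
--     # Bucket distribution over the fixed priority categories instead of a comparison sort.
--     result: Dict[str, List[Dict[str, Any]]] = {}
--     for label in dict.fromkeys(labels):
--         matching = [
--             chunk for chunk in all_chunks if str(chunk.get("label", "")).strip() == label
--         ]
--         ordered: List[Dict[str, Any]] = []
--         for p in PRIORITY_ORDER:
--             ordered.extend(c for c in matching if c.get("type") == p)
--         ordered.extend(c for c in matching if c.get("type") not in PRIORITY_ORDER)
--         result[label] = ordered[:MAX_CHUNKS_PER_LABEL]
--     return result
-- ===== Notes on version B (the rewrite author's own statement) =====
-- stated objective: faster
-- what changed: Replaces the per-label stable comparison sort by a bucket distribution over the fixed priority categories (append matching chunks per priority in original order, unknown types last) and builds the result dict in one pass over the deduplicated labels instead of pre-seeding every label with [] and overwriting.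
import Mathlib
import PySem

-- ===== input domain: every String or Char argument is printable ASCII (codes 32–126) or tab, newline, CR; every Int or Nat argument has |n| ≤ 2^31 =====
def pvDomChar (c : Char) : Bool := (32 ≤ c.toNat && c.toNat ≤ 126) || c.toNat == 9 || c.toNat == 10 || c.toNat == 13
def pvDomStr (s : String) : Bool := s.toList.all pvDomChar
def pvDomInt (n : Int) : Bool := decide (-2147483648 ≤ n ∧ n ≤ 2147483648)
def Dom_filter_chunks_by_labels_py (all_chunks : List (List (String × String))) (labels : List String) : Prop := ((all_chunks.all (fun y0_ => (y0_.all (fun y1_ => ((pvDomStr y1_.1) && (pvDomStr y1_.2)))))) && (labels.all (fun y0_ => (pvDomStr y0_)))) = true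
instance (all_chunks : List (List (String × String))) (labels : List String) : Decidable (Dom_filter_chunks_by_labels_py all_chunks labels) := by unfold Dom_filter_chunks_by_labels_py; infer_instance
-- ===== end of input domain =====

-- B replaces the per-label stable comparison sort by a bucket distribution over the fixed
-- priority categories and builds the result dict in one pass over the deduplicated labels
-- (alternative decomposition; same return value).


-- ===== PORT A =====
-- PRIORITY_ORDER / MAX_CHUNKS_PER_LABEL
def pvPriority : List String := ["method", "benefit", "application", "effect", "definition"]

-- the sort key lambda: PRIORITY_ORDER.index(item.get("type")) if item.get("type") in PRIORITY_ORDER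
-- else len(PRIORITY_ORDER); 'None in PRIORITY_ORDER' is False and .index succeeds exactly on members,
-- so the match on index? is the same conditional, step for step
def pvKeyOf (t : Option String) : Int :=
  match t with
  | some s =>
    match PySem.List.index? pvPriority s with
    | some i => (i : Int)
    | none => 5
  | none => 5

def pvKeyA (item : List (String × String)) : Int :=
  pvKeyOf ((PySem.Dict.mk item).get? "type")

def filter_chunks_by_labels_py (all_chunks : List (List (String × String))) (labels : List String) : List (String × List (List (String × String))) :=
  -- grouped = {label: [] for label in labels}
  let grouped : PySem.Dict String (List (List (String × String))) :=
    labels.foldl (fun d label => d.insert label []) (PySem.Dict.mk [])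
  -- for label in labels: ...
  let grouped :=
    labels.foldl (fun d label =>
      let label_chunks := all_chunks.filter
        (fun chunk => PySem.Str.strip ((PySem.Dict.mk chunk).getD "label" "") == label)
      let sorted_chunks := PySem.List.sorted label_chunks pvKeyA
      d.insert label (PySem.List.slice sorted_chunks none (some 5))) grouped
  grouped.items

-- ===== PORT B =====
-- c.get("type") not in PRIORITY_ORDER
def pvTypeIn (c : List (String × String)) : Bool :=
  match (PySem.Dict.mk c).get? "type" with
  | some s => pvPriority.contains s
  | none => false

-- ordered = []; for p in PRIORITY_ORDER: ordered.extend(matching with type == p); then the rest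
def pvOrderedB (matching : List (List (String × String))) : List (List (String × String)) :=
  pvPriority.foldl
    (fun acc p => acc ++ matching.filter (fun c => (PySem.Dict.mk c).get? "type" == some p)) []
  ++ matching.filter (fun c => !(pvTypeIn c))

def filter_chunks_by_labels_py_alt (all_chunks : List (List (String × String))) (labels : List String) : List (String × List (List (String × String))) :=
  ((PySem.List.dedup labels).foldl (fun d label =>
    let matching := all_chunks.filter
      (fun chunk => PySem.Str.strip ((PySem.Dict.mk chunk).getD "label" "") == label)
    d.insert label (PySem.List.slice (pvOrderedB matching) none (some 5))) (PySem.Dict.mk [])).items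

-- ===== PRECONDITION & SPEC =====
def Spec_filter_chunks_by_labels_py (all_chunks : List (List (String × String))) (labels : List String) (out : List (String × List (List (String × String)))) : Prop := out = filter_chunks_by_labels_py_alt all_chunks labels
instance (all_chunks : List (List (String × String))) (labels : List String) (out : List (String × List (List (String × String)))) : Decidable (Spec_filter_chunks_by_labels_py all_chunks labels out) := by unfold Spec_filter_chunks_by_labels_py; infer_instance

-- ===== CLAIM (what is proved, stated in full; the proofs are below) =====
def Claim_equal_filter_chunks_by_labels_py : Prop := ∀ (all_chunks : List (List (String × String))) (labels : List String), Dom_filter_chunks_by_labels_py all_chunks labels → Spec_filter_chunks_by_labels_py all_chunks labels (filter_chunks_by_labels_py all_chunks labels)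

-- ===== LEMMAS AND PROOFS =====

-- first occurrences, in order: the reference normal form for both dict builds
def pvFirsts {α : Type} [DecidableEq α] : List α → List α
  | [] => []
  | x :: xs => x :: (pvFirsts xs).filter (fun y => y ≠ x)

theorem pv_mem_firsts {α : Type} [DecidableEq α] (xs : List α) (y : α) :
    y ∈ pvFirsts xs ↔ y ∈ xs := by
  induction xs with
  | nil => simp [pvFirsts]
  | cons x xs ih =>
    simp [pvFirsts, List.mem_filter, ih]
    by_cases h : y = x <;> simp [h]

theorem pv_firsts_of_nodup {α : Type} [DecidableEq α] (xs : List α) (h : xs.Nodup) :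
    pvFirsts xs = xs := by
  induction xs with
  | nil => rfl
  | cons x xs ih =>
    simp [pvFirsts, ih h.of_cons]
    intro a ha rfl
    simp at h; exact h.1 ha

theorem pv_keyOf_some (s : String) :
    pvKeyOf (some s) = if s = "method" then 0 else if s = "benefit" then 1
      else if s = "application" then 2 else if s = "effect" then 3
      else if s = "definition" then 4 else 5 := by
  by_cases h1 : s = "method"; · subst h1; decide
  by_cases h2 : s = "benefit"; · subst h2; decide
  by_cases h3 : s = "application"; · subst h3; decide
  by_cases h4 : s = "effect"; · subst h4; decide
  by_cases h5 : s = "definition"; · subst h5; decide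
  simp [pvKeyOf, PySem.List.index?, pvPriority, List.idxOf?_cons, h1, h2, h3, h4, h5,
    Ne.symm h1, Ne.symm h2, Ne.symm h3, Ne.symm h4, Ne.symm h5]

theorem pv_insertBy_split {α : Type} (before : α → α → Bool) (x : α) (as bs : List α)
    (ha : ∀ y ∈ as, before x y = false) (hb : ∀ y ∈ bs, before x y = true) :
    PySem.List.insertBy before x (as ++ bs) = as ++ x :: bs := by
  induction as with
  | nil =>
    cases bs with
    | nil => simp [PySem.List.insertBy]
    | cons b bs' => simp [PySem.List.insertBy, hb b (by simp)]
  | cons a as' ih =>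
    simp only [List.cons_append, PySem.List.insertBy, ha a (by simp)]
    simp [ih (fun y hy => ha y (by simp [hy])) ]

theorem pv_foldl_add (xs : List String) : ∀ (s : List String),
    List.foldl PySem.Set.add s xs = s ++ (pvFirsts xs).filter (fun y => !(s.contains y)) := by
  induction xs with
  | nil => intro s; simp [pvFirsts]
  | cons x xs ih =>
    intro s
    simp only [List.foldl_cons]
    rw [ih]
    by_cases hc : x ∈ s
    · have hadd : PySem.Set.add s x = s := by
        simp [PySem.Set.add, PySem.Set.contains, hc]
      rw [hadd]
      congr 1
      simp only [pvFirsts, List.filter_cons, List.filter_filter]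
      have hx : (!(s.contains x)) = false := by simp [hc]
      rw [hx, if_neg (by simp)]
      apply List.filter_congr
      intro y hy
      by_cases hyx : y = x
      · subst hyx; simp [hc]
      · simp [hyx]
    · have hadd : PySem.Set.add s x = s ++ [x] := by
        simp [PySem.Set.add, PySem.Set.contains, hc]
      rw [hadd]
      simp only [pvFirsts, List.filter_cons, List.filter_filter, List.append_assoc]
      have hx : (!(s.contains x)) = true := by simp [hc]
      rw [if_pos hx]
      congr 1
      simp only [List.singleton_append]
      congr 1
      apply List.filter_congr
      intro y hy
      simp only [List.contains_append, List.contains_cons]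
      by_cases hyx : y = x
      · subst hyx; simp
      · simp [hyx]

theorem pv_dedup_eq_firsts (xs : List String) :
    PySem.List.dedup xs = pvFirsts xs := by
  rw [PySem.List.dedup, PySem.Set.ofList, pv_foldl_add]
  simp [PySem.Set.empty]

theorem pv_insert_flat {α : Type} (key : α → Int) (x : α) (lo hi : List Int) (F : Int → List α)
    (hF : ∀ k, ∀ y ∈ F k, key y = k)
    (hlo : ∀ k ∈ lo, k ≤ key x) (hhi : ∀ k ∈ hi, key x < k) :
    PySem.List.insertBy (fun a b => decide (key a < key b)) x (lo.flatMap F ++ hi.flatMap F)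
      = lo.flatMap F ++ x :: hi.flatMap F := by
  apply pv_insertBy_split
  · intro y hy
    simp only [List.mem_flatMap] at hy
    obtain ⟨k, hk, hyk⟩ := hy
    have := hF k y hyk
    simp only [decide_eq_false_iff_not, not_lt, this]
    exact hlo k hk
  · intro y hy
    simp only [List.mem_flatMap] at hy
    obtain ⟨k, hk, hyk⟩ := hy
    have := hF k y hyk
    simp only [decide_eq_true_eq, this]
    exact hhi k hk


theorem pv_sorted_buckets {α : Type} (key : α → Int) (xs : List α)
    (h : ∀ x ∈ xs, 0 ≤ key x ∧ key x ≤ 5) :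
    PySem.List.sorted xs key
      = ([0, 1, 2, 3, 4, 5] : List Int).flatMap (fun k => xs.filter (fun x => decide (key x = k))) := by
  induction xs using List.reverseRecOn with
  | nil => simp [PySem.List.sorted]
  | append_singleton ys x ih =>
    rw [PySem.List.sorted_eq_foldl_insertBy, List.foldl_append, List.foldl_cons, List.foldl_nil,
      ← PySem.List.sorted_eq_foldl_insertBy,
      ih (fun y hy => h y (by simp [hy]))]
    have hx := h x (by simp)
    set F : Int → List α := fun k => ys.filter (fun x => decide (key x = k)) with hFdef
    have hF : ∀ k, ∀ y ∈ F k, key y = k := by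
      intro k y hy
      simp [hFdef, List.mem_filter] at hy
      exact hy.2
    have hfilt : ∀ k : Int, (ys ++ [x]).filter (fun x => decide (key x = k))
        = F k ++ (if key x = k then [x] else []) := by
      intro k
      rw [List.filter_append, List.filter_cons]
      simp only [List.filter_nil, decide_eq_true_eq]
      split_ifs <;> simp [hFdef]
    -- case split on the value of key x
    have h6 : key x = 0 ∨ key x = 1 ∨ key x = 2 ∨ key x = 3 ∨ key x = 4 ∨ key x = 5 := by omega
    rcases h6 with hj | hj | hj | hj | hj | hj
    · rw [show ([0,1,2,3,4,5] : List Int) = [0] ++ [1,2,3,4,5] from rfl]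
      rw [List.flatMap_append, pv_insert_flat key x _ _ F hF
        (by intro k hk; simp at hk; omega) (by intro k hk; fin_cases hk <;> omega)]
      simp [List.flatMap_cons, hfilt, hj]
    · rw [show ([0,1,2,3,4,5] : List Int) = [0,1] ++ [2,3,4,5] from rfl]
      rw [List.flatMap_append, pv_insert_flat key x _ _ F hF
        (by intro k hk; fin_cases hk <;> omega) (by intro k hk; fin_cases hk <;> omega)]
      simp [List.flatMap_cons, hfilt, hj]
    · rw [show ([0,1,2,3,4,5] : List Int) = [0,1,2] ++ [3,4,5] from rfl]
      rw [List.flatMap_append, pv_insert_flat key x _ _ F hF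
        (by intro k hk; fin_cases hk <;> omega) (by intro k hk; fin_cases hk <;> omega)]
      simp [List.flatMap_cons, hfilt, hj]
    · rw [show ([0,1,2,3,4,5] : List Int) = [0,1,2,3] ++ [4,5] from rfl]
      rw [List.flatMap_append, pv_insert_flat key x _ _ F hF
        (by intro k hk; fin_cases hk <;> omega) (by intro k hk; fin_cases hk <;> omega)]
      simp [List.flatMap_cons, hfilt, hj]
    · rw [show ([0,1,2,3,4,5] : List Int) = [0,1,2,3,4] ++ [5] from rfl]
      rw [List.flatMap_append, pv_insert_flat key x _ _ F hF
        (by intro k hk; fin_cases hk <;> omega) (by intro k hk; fin_cases hk <;> omega)]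
      simp [List.flatMap_cons, hfilt, hj]
    · rw [show ([0,1,2,3,4,5] : List Int) = [0,1,2,3,4,5] ++ [] from rfl]
      rw [List.flatMap_append, pv_insert_flat key x _ _ F hF
        (by intro k hk; fin_cases hk <;> omega) (by intro k hk; simp at hk)]
      simp [List.flatMap_cons, hfilt, hj]

def pvTypeIn' (t : Option String) : Bool :=
  match t with
  | some s => pvPriority.contains s
  | none => false

theorem pv_key_iff (t : Option String) :
    (decide (pvKeyOf t = 0) = (t == some "method")) ∧
    (decide (pvKeyOf t = 1) = (t == some "benefit")) ∧
    (decide (pvKeyOf t = 2) = (t == some "application")) ∧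
    (decide (pvKeyOf t = 3) = (t == some "effect")) ∧
    (decide (pvKeyOf t = 4) = (t == some "definition")) ∧
    (decide (pvKeyOf t = 5) = !(pvTypeIn' t)) := by
  cases t with
  | none => decide
  | some s =>
    by_cases h1 : s = "method"; · subst h1; decide
    by_cases h2 : s = "benefit"; · subst h2; decide
    by_cases h3 : s = "application"; · subst h3; decide
    by_cases h4 : s = "effect"; · subst h4; decide
    by_cases h5 : s = "definition"; · subst h5; decide
    simp [pv_keyOf_some, pvTypeIn', pvPriority, h1, h2, h3, h4, h5]

theorem pv_key_bounds (c : List (String × String)) : 0 ≤ pvKeyA c ∧ pvKeyA c ≤ 5 := by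
  unfold pvKeyA
  cases h : (PySem.Dict.mk c).get? "type" with
  | none => simp [pvKeyOf]
  | some s => rw [pv_keyOf_some]; split_ifs <;> norm_num

theorem pv_sorted_eq_ordered (m : List (List (String × String))) :
    PySem.List.sorted m pvKeyA = pvOrderedB m := by
  rw [pv_sorted_buckets pvKeyA m (fun c _ => pv_key_bounds c)]
  have hfc : ∀ (k : Int) (p : List (String × String) → Bool),
      (∀ c, decide (pvKeyA c = k) = p c) →
      m.filter (fun c => decide (pvKeyA c = k)) = m.filter p := by
    intro k p hp
    exact List.filter_congr (fun c _ => hp c)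
  simp only [List.flatMap_cons, List.flatMap_nil, List.append_nil]
  rw [hfc 0 _ (fun c => (pv_key_iff _).1),
      hfc 1 _ (fun c => (pv_key_iff _).2.1),
      hfc 2 _ (fun c => (pv_key_iff _).2.2.1),
      hfc 3 _ (fun c => (pv_key_iff _).2.2.2.1),
      hfc 4 _ (fun c => (pv_key_iff _).2.2.2.2.1),
      hfc 5 _ (fun c => (pv_key_iff _).2.2.2.2.2)]
  show _ = pvOrderedB m
  simp only [pvOrderedB, pvPriority, List.foldl_cons, List.foldl_nil, List.nil_append]
  simp [List.flatMap_cons, pvTypeIn, pvTypeIn', List.append_assoc]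

theorem pv_items_foldl_insert {ν : Type} (f : String → ν) (ls : List String) :
    ∀ (acc : List (String × ν)),
    (ls.foldl (fun d l => d.insert l (f l)) (PySem.Dict.mk acc)).items
      = acc.map (fun p => if p.1 ∈ ls then (p.1, f p.1) else p)
        ++ ((pvFirsts ls).filter (fun l => !(acc.any (fun p => p.1 == l)))).map (fun l => (l, f l)) := by
  induction ls with
  | nil => intro acc; simp [pvFirsts]
  | cons l ls ih =>
    intro acc
    simp only [List.foldl_cons]
    by_cases hc : acc.any (fun p => p.1 == l)
    · have hins : (PySem.Dict.mk acc).insert l (f l)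
          = PySem.Dict.mk (acc.map (fun p => if p.1 == l then (l, f l) else p)) := by
        simp [PySem.Dict.insert, PySem.Dict.contains, hc]
      rw [hins, ih]
      congr 1
      · rw [List.map_map]
        apply List.map_congr_left
        intro p hp
        by_cases hpl : p.1 = l
        · simp [Function.comp, hpl]
        · simp [Function.comp, hpl]
      · congr 1
        -- keys are unchanged by the overwrite, and l is already filtered out
        have hany : ∀ l' : String,
            ((acc.map (fun p => if p.1 == l then (l, f l) else p)).any (fun p => p.1 == l'))
              = acc.any (fun p => p.1 == l') := by
          intro l'
          rw [List.any_map]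
          congr 1
          funext p
          by_cases hpl : p.1 = l
          · simp [Function.comp, hpl]
          · simp [Function.comp, hpl]
        simp only [hany]
        simp only [pvFirsts, List.filter_cons, List.filter_filter]
        rw [show (!(acc.any (fun p => p.1 == l))) = false by simp [hc], if_neg (by simp)]
        apply List.filter_congr
        intro y hy
        by_cases hyl : y = l
        · subst hyl; simp [hc]
        · simp [hyl]
    · have hins : (PySem.Dict.mk acc).insert l (f l)
          = PySem.Dict.mk (acc ++ [(l, f l)]) := by
        simp [PySem.Dict.insert, PySem.Dict.contains, hc]
      rw [hins, ih]
      have hkey : ∀ p ∈ acc, p.1 ≠ l := by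
        intro p hp heq
        exact hc (List.any_of_mem hp (by simp [heq]))
      rw [List.map_append]
      simp only [List.map_cons, List.map_nil]
      have h1 : acc.map (fun p => if p.1 ∈ ls then (p.1, f p.1) else p)
          = acc.map (fun p => if p.1 ∈ l :: ls then (p.1, f p.1) else p) := by
        apply List.map_congr_left
        intro p hp
        by_cases hpm : p.1 ∈ ls
        · simp [hpm]
        · simp [hpm, hkey p hp]
      rw [h1]
      have h2 : (if (l : String) ∈ ls then (l, f l) else (l, f l)) = (l, f l) := by
        split_ifs <;> rfl
      rw [h2]
      have h3 : ((pvFirsts (l :: ls)).filter (fun l' => !(acc.any (fun p => p.1 == l')))).map (fun l' => (l', f l'))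
          = (l, f l) :: ((pvFirsts ls).filter
              (fun l' => !((acc ++ [(l, f l)]).any (fun p => p.1 == l')))).map (fun l' => (l', f l')) := by
        simp only [pvFirsts, List.filter_cons, List.filter_filter]
        rw [show (!(acc.any (fun p => p.1 == l))) = true by simp [hc], if_pos rfl]
        simp only [List.map_cons]
        congr 2
        apply List.filter_congr
        intro y hy
        simp only [List.any_append, List.any_cons, List.any_nil]
        by_cases hyl : y = l
        · subst hyl; simp
        · simp [hyl, Ne.symm hyl]
      rw [h3]
      simp [List.append_assoc]

theorem pv_glue (all_chunks : List (List (String × String))) (labels : List String) :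
    filter_chunks_by_labels_py all_chunks labels = filter_chunks_by_labels_py_alt all_chunks labels := by
  unfold filter_chunks_by_labels_py filter_chunks_by_labels_py_alt
  simp only []
  -- value functions
  set vA : String → List (List (String × String)) := fun label =>
    PySem.List.slice (PySem.List.sorted (all_chunks.filter
      (fun chunk => PySem.Str.strip ((PySem.Dict.mk chunk).getD "label" "") == label)) pvKeyA) none (some 5) with hvA
  set vB : String → List (List (String × String)) := fun label =>
    PySem.List.slice (pvOrderedB (all_chunks.filter
      (fun chunk => PySem.Str.strip ((PySem.Dict.mk chunk).getD "label" "") == label))) none (some 5) with hvB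
  have hv : vA = vB := by
    funext label
    rw [hvA, hvB]
    simp only [pv_sorted_eq_ordered]
  -- pass 1 of A
  have h1 : (labels.foldl (fun d label => d.insert label []) (PySem.Dict.mk []))
      = PySem.Dict.mk ((pvFirsts labels).map (fun l => (l, ([] : List (List (String × String)))))) := by
    have h := pv_items_foldl_insert (fun _ : String => ([] : List (List (String × String)))) labels []
    simp only [List.map_nil, List.any_nil, Bool.not_false, List.filter_true, List.nil_append] at h
    calc labels.foldl (fun d label => d.insert label []) (PySem.Dict.mk [])
        = PySem.Dict.mk (labels.foldl (fun d label => d.insert label []) (PySem.Dict.mk [])).items := rfl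
      _ = _ := by rw [h]
  rw [h1]
  set acc1 : List (String × List (List (String × String))) :=
    (pvFirsts labels).map (fun l => (l, ([] : List (List (String × String))))) with hacc1
  rw [pv_items_foldl_insert vA labels acc1, pv_items_foldl_insert vB (PySem.List.dedup labels) []]
  -- RHS of B
  have hnd : (PySem.List.dedup labels).Nodup := PySem.List.nodup_dedup labels
  rw [pv_dedup_eq_firsts] at hnd ⊢
  rw [pv_firsts_of_nodup _ hnd]
  simp only [List.map_nil, List.any_nil, Bool.not_false, List.filter_true, List.nil_append]
  -- LHS of A
  have hmap : acc1.map (fun p => if p.1 ∈ labels then (p.1, vA p.1) else p)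
      = (pvFirsts labels).map (fun l => (l, vA l)) := by
    rw [hacc1, List.map_map]
    apply List.map_congr_left
    intro l hl
    have : l ∈ labels := (pv_mem_firsts labels l).mp hl
    simp [Function.comp, this]
  have hfilt : (pvFirsts labels).filter (fun l => !(acc1.any (fun p => p.1 == l))) = [] := by
    apply List.filter_eq_nil_iff.mpr
    intro l hl
    have : (l, ([] : List (List (String × String)))) ∈ acc1 := by
      rw [hacc1]; exact List.mem_map.mpr ⟨l, hl, rfl⟩
    simp only [Bool.not_eq_true', Bool.not_eq_false]
    exact List.any_of_mem this (by simp)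
  rw [hmap, hfilt, hv]
  simp

-- ===== VERDICT (by name: the statement is the Claim_ definition above) =====
theorem filter_chunks_by_labels_py_spec : Claim_equal_filter_chunks_by_labels_py := by
  intro all_chunks labels _
  unfold Spec_filter_chunks_by_labels_py
  exact pv_glue all_chunks labels
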